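-- pv_equiv track=rewrite | github.com/KhaledAli0907/alx-higher_level_programming | 0x01-python-if_else_loops_functions/101-remove_char_at.py | remove_char_at
-- ===== SOURCE A (Python) =====
-- def remove_char_at(str, n):
--     new = ""
--     position = 0
--     for c in str:
--         if position != n:
--             new += str[position]
--         position += 1
--     return new
-- ===== SOURCE B (Python) =====
-- def remove_char_at(str, n):
--     if n < 0 or n >= len(str):
--         return str
--     return str[:n] + str[n + 1:]
-- ===== Notes on version B (the rewrite author's own statement) =====
-- stated objective: simpler
-- what changed: Replaced the character-by-character positional copy loop (quadratic repeated string concatenation) with a bounds guard plus a single slice concatenation str[:n] + str[n+1:].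
import Mathlib
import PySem

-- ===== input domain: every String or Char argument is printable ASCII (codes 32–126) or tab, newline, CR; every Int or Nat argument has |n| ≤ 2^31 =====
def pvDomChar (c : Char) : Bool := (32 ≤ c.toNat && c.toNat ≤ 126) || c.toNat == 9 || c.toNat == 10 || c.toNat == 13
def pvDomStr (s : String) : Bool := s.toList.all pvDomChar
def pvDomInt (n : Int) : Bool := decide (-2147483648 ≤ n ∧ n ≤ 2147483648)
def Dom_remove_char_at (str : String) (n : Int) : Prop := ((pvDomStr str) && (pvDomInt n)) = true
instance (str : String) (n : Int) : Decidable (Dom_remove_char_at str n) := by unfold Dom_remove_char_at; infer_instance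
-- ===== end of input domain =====

-- B replaces A's positional character-copy loop with a bounds guard and one slice concatenation; return values agree everywhere.

-- ===== PORT A =====
-- for c in str: if position != n: new += str[position]; position += 1
-- (str[position] is always in range while the loop runs, so pyGet? always returns some; .toList turns it into the appended one-character chunk)
def remove_char_at (str : String) (n : Int) : String :=
  let s := str.toList
  (String.ofList ((s.foldl
      (fun (st : List Char × Int) (_c : Char) =>
        ((if st.2 ≠ n then st.1 ++ (PySem.List.pyGet? s st.2).toList else st.1), st.2 + 1))
      ([], 0)).1))

-- ===== PORT B =====
def remove_char_at_alt (str : String) (n : Int) : String :=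
  if n < 0 || (str.toList.length : Int) ≤ n then str
  else String.ofList (PySem.List.slice str.toList none (some n) ++
                  PySem.List.slice str.toList (some (n + 1)) none)

-- ===== PRECONDITION & SPEC =====
def Spec_remove_char_at (str : String) (n : Int) (out : String) : Prop := out = remove_char_at_alt str n
instance (str : String) (n : Int) (out : String) : Decidable (Spec_remove_char_at str n out) := by unfold Spec_remove_char_at; infer_instance

-- ===== CLAIM (what is proved, stated in full; the proofs are below) =====
def Claim_equal_remove_char_at : Prop := ∀ (str : String) (n : Int), Dom_remove_char_at str n → Spec_remove_char_at str n (remove_char_at str n)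

-- ===== LEMMAS AND PROOFS =====

-- loop invariant, out-of-range n: no position ever equals n, every character is copied
theorem pv_fold_out (s : List Char) (n : Int)
    (hout : ∀ j : Nat, j < s.length → (j : Int) ≠ n) :
    ∀ (t : List Char) (k : Nat) (acc : List Char), t = List.drop k s →
      (t.foldl
        (fun (st : List Char × Int) (_c : Char) =>
          ((if st.2 ≠ n then st.1 ++ (PySem.List.pyGet? s st.2).toList else st.1), st.2 + 1))
        (acc, (k : Int))).1 = acc ++ List.drop k s := by
  intro t
  induction t with
  | nil => intro k acc h; simp [← h]
  | cons c t' ih =>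
    intro k acc h
    have hk : k < s.length := by
      by_contra hge
      rw [List.drop_eq_nil_of_le (by omega : s.length ≤ k)] at h
      simp at h
    have hget : s[k]? = some c := by
      have h2 : (List.drop k s)[0]? = some c := by rw [← h]; rfl
      simpa [List.getElem?_drop] using h2
    have hne : (k : Int) ≠ n := hout k hk
    have ht' : t' = List.drop (k + 1) s := by
      have := congrArg List.tail h
      simpa [List.tail_drop] using this
    simp only [List.foldl_cons, hne, if_pos, ne_eq, not_false_iff]
    have hcast : (k : Int) + 1 = ((k + 1 : Nat) : Int) := by push_cast; ring
    rw [hcast]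
    rw [ih (k + 1) _ ht']
    have hdrop : List.drop k s = c :: List.drop (k + 1) s := by
      rw [← h, ht']
    simp [PySem.List.pyGet?_natCast, hget, hdrop]

-- loop invariant, in-range n = m: character at position m is skipped, all others copied
theorem pv_fold_in (s : List Char) (n : Int) (m : Nat) (hm : (m : Int) = n)
    (hmlt : m < s.length) :
    ∀ (t : List Char) (k : Nat) (acc : List Char), t = List.drop k s →
      (t.foldl
        (fun (st : List Char × Int) (_c : Char) =>
          ((if st.2 ≠ n then st.1 ++ (PySem.List.pyGet? s st.2).toList else st.1), st.2 + 1))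
        (acc, (k : Int))).1 =
      acc ++ (if k ≤ m then (List.drop k s).take (m - k) ++ List.drop (m + 1) s
              else List.drop k s) := by
  intro t
  induction t with
  | nil =>
    intro k acc h
    have hlen : s.length ≤ k := by
      by_contra hlt
      have : List.drop k s ≠ [] := by
        apply List.ne_nil_of_length_pos
        simp [List.length_drop]; omega
      exact this h.symm
    have : ¬ k ≤ m := by omega
    simp [this, ← h]
  | cons c t' ih =>
    intro k acc h
    have hk : k < s.length := by
      by_contra hge
      rw [List.drop_eq_nil_of_le (by omega : s.length ≤ k)] at h
      simp at h
    have hget : s[k]? = some c := by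
      have h2 : (List.drop k s)[0]? = some c := by rw [← h]; rfl
      simpa [List.getElem?_drop] using h2
    have ht' : t' = List.drop (k + 1) s := by
      have := congrArg List.tail h
      simpa [List.tail_drop] using this
    have hdrop : List.drop k s = c :: List.drop (k + 1) s := by rw [← h, ht']
    have hcast : (k : Int) + 1 = ((k + 1 : Nat) : Int) := by push_cast; ring
    by_cases hkm : k = m
    · -- position equals n: skip this character
      have heq : ((k : Int) ≠ n) = False := by
        simp [hkm, hm]
      simp only [List.foldl_cons, heq, if_false]
      rw [hcast, ih (k + 1) _ ht']
      have h1 : ¬ k + 1 ≤ m := by omega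
      have h2 : k ≤ m := by omega
      simp [hkm]
    · -- position differs from n: copy s[k]
      have hne : (k : Int) ≠ n := by
        intro hc; rw [← hm] at hc
        exact hkm (by exact_mod_cast hc)
      simp only [List.foldl_cons, hne, if_pos, ne_eq, not_false_iff]
      rw [hcast, ih (k + 1) _ ht']
      by_cases hlt : k < m
      · have h1 : k + 1 ≤ m := by omega
        have h2 : k ≤ m := by omega
        have htk : (List.drop k s).take (m - k)
            = c :: (List.drop (k + 1) s).take (m - (k + 1)) := by
          rw [hdrop]
          have : m - k = (m - (k + 1)) + 1 := by omega
          rw [this, List.take_succ_cons]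
        simp [h1, h2, htk, PySem.List.pyGet?_natCast, hget]
      · have h1 : ¬ k + 1 ≤ m := by omega
        have h2 : ¬ k ≤ m := by omega
        simp [h1, h2, hdrop, PySem.List.pyGet?_natCast, hget]

-- ===== VERDICT (by name: the statement is the Claim_ definition above) =====
theorem remove_char_at_spec : Claim_equal_remove_char_at := by
  intro str n _
  unfold Spec_remove_char_at remove_char_at remove_char_at_alt
  set s := str.toList with hs
  by_cases hout : n < 0 ∨ (s.length : Int) ≤ n
  · -- out of range: A copies everything, B returns str unchanged
    have hg : (n < 0 || (s.length : Int) ≤ n) = true := by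
      rcases hout with h | h <;> simp [h]
    have hall : ∀ j : Nat, j < s.length → (j : Int) ≠ n := by
      intro j hj hc
      rcases hout with h | h <;> omega
    have := pv_fold_out s n hall s 0 [] (by simp)
    simp only [hg, if_true]
    have h0 : ((0 : Nat) : Int) = 0 := rfl
    rw [show (([], (0:Int)) : List Char × Int) = (([] : List Char), ((0:Nat) : Int)) from rfl]
    rw [this]
    simp [hs, String.ofList_toList]
  · rw [not_or, not_lt, not_le] at hout
    obtain ⟨h0, hlen⟩ := hout
    have hg : (n < 0 || (s.length : Int) ≤ n) = false := by
      simp [not_lt.mpr h0, not_le.mpr hlen]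
    set m := n.toNat with hmdef
    have hm : (m : Int) = n := Int.toNat_of_nonneg h0
    have hmlt : m < s.length := by omega
    have := pv_fold_in s n m hm hmlt s 0 [] (by simp)
    simp only [hg, Bool.false_eq_true, if_false]
    rw [show (([], (0:Int)) : List Char × Int) = (([] : List Char), ((0:Nat) : Int)) from rfl]
    rw [this]
    have hsl1 : PySem.List.slice s none (some n) = s.take m := by
      rw [PySem.List.slice_to s h0]
    have hsl2 : PySem.List.slice s (some (n + 1)) none = s.drop (m + 1) := by
      rw [PySem.List.slice_from s (by omega)]
      congr 1; omega
    simp [hsl1, hsl2]
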